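-- pv_equiv track=rewrite | github.com/Youzhuqinghuan/ILD_cls | Generate_Descriptors/evaluate_descriptors.py | create_case_mapping
-- ===== SOURCE A (Python) =====
-- from typing import Dict, List, Tuple
--
-- def normalize_case_name(name: str) -> str:
--     """
--     标准化病例名称，处理命名差异
--
--     Args:
--         name: 原始病例名称
--
--     Returns:
--         标准化后的病例名称
--     """
--     # 将"NSIP 1"格式转换为"NSIP1"格式
--     return name.replace(" ", "")
--
-- def create_case_mapping(annotations: List[Dict], predictions: List[Dict]) -> Dict[str, Tuple[Dict, Dict]]:
--     """
--     创建病例映射，匹配标注数据和预测结果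
--
--     Args:
--         annotations: 标注数据列表
--         predictions: 预测结果列表
--
--     Returns:
--         病例映射字典，键为标准化病例名称，值为(标注数据, 预测数据)元组
--     """
--     # 创建标注数据映射
--     ann_map = {}
--     for ann in annotations:
--         case_name = normalize_case_name(ann['filename'])
--         ann_map[case_name] = ann
--
--     # 创建预测数据映射
--     pred_map = {}
--     for pred in predictions:
--         case_name = normalize_case_name(pred['case_name'])
--         pred_map[case_name] = pred
--
--     # 找到共同的病例
--     common_cases = set(ann_map.keys()) & set(pred_map.keys())
--
--     # 创建匹配映射
--     case_mapping = {}
--     for case_name in common_cases: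
--         case_mapping[case_name] = (ann_map[case_name], pred_map[case_name])
--
--     return case_mapping
-- ===== SOURCE B (Python) =====
-- def create_case_mapping(annotations, predictions):
--     case_mapping = {}
--     for ann in annotations:
--         name = ann['filename'].replace(" ", "")
--         for pred in predictions:
--             if pred['case_name'].replace(" ", "") == name:
--                 case_mapping[name] = (ann, pred)
--     return case_mapping
-- ===== Notes on version B (the rewrite author's own statement) =====
-- stated objective: alternative
-- what changed: B is a plain nested-loop join: no ann_map, no pred_map, no set intersection -- for each annotation it scans all predictions and overwrites the entry on every key match, so last annotation and last prediction win exactly as in A (dicts are equal up to key order).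
import Mathlib
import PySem

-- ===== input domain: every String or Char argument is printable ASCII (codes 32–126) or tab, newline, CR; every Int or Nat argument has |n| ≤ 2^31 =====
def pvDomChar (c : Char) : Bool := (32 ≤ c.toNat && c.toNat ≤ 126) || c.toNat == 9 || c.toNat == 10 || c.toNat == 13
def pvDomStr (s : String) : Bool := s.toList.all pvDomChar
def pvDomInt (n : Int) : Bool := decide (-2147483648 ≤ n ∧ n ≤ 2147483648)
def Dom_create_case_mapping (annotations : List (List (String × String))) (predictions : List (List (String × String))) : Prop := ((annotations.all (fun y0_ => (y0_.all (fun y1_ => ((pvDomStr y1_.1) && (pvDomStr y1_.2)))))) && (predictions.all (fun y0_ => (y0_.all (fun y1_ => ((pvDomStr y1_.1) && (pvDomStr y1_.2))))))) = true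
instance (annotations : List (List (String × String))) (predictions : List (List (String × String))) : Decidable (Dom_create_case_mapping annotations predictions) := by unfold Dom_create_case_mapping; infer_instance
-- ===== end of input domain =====

-- B replaces A's hash-index join (ann_map, pred_map, set intersection) by a plain nested-loop
-- join with no index at all: for each annotation it scans every prediction and overwrites the
-- entry on each key match (objective: alternative; O(n*m) instead of O(n+m)).
-- Equivalence is about the RETURNED dict; Python compares dicts ignoring insertion order, and the
-- Lean ports below happen to produce the same item order, which is what is proved.

-- shared helper: normalize_case_name / .replace(" ", "")
def pvNorm (s : String) : String := PySem.Str.replace s " " ""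
-- ann['filename'] / pred['case_name']: first-match association-list lookup (dict convention);
-- the .getD "" default is never reached under Pre_ (the key is present).
def pvAnnKey (a : List (String × String)) : String := pvNorm ((List.lookup "filename" a).getD "")
def pvPredKey (p : List (String × String)) : String := pvNorm ((List.lookup "case_name" p).getD "")

-- ===== PORT A =====
-- ann_map loop
def pvAnnDict (annotations : List (List (String × String))) : PySem.Dict String (List (String × String)) :=
  annotations.foldl (fun d a => d.insert (pvAnnKey a) a) PySem.Dict.empty
-- pred_map loop
def pvPredDict (predictions : List (List (String × String))) : PySem.Dict String (List (String × String)) :=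
  predictions.foldl (fun d p => d.insert (pvPredKey p) p) PySem.Dict.empty

-- ann_map[n] / pred_map[n] are ported as (get? n).getD []: exact, since n comes from the key intersection.
def create_case_mapping (annotations : List (List (String × String))) (predictions : List (List (String × String))) : List (String × (List (String × String)) × (List (String × String))) :=
  let annMap := pvAnnDict annotations
  let predMap := pvPredDict predictions
  let common := PySem.Set.inter (PySem.Set.ofList annMap.keys) (PySem.Set.ofList predMap.keys)
  (common.foldl (fun d n => d.insert n ((annMap.get? n).getD [], (predMap.get? n).getD [])) PySem.Dict.empty).items

-- ===== PORT B =====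
-- nested-loop join: outer loop over annotations, inner scan over all predictions
def create_case_mapping_alt (annotations : List (List (String × String))) (predictions : List (List (String × String))) : List (String × (List (String × String)) × (List (String × String))) :=
  (annotations.foldl (fun d a =>
      predictions.foldl (fun d p =>
        if pvPredKey p == pvAnnKey a then d.insert (pvAnnKey a) (a, p) else d) d)
    PySem.Dict.empty).items

-- ===== PRECONDITION & SPEC =====
-- Pre_ excludes exactly the inputs on which Python A raises KeyError: an annotation without a
-- 'filename' key or a prediction without a 'case_name' key.
def Pre_create_case_mapping (annotations : List (List (String × String))) (predictions : List (List (String × String))) : Prop :=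
  (annotations.all (fun a => (List.lookup "filename" a).isSome)) = true ∧
  (predictions.all (fun p => (List.lookup "case_name" p).isSome)) = true
instance (annotations : List (List (String × String))) (predictions : List (List (String × String))) : Decidable (Pre_create_case_mapping annotations predictions) := by unfold Pre_create_case_mapping; infer_instance

def pvWitness_create_case_mapping : (List (List (String × String))) × (List (List (String × String))) :=
  ([[("filename", "NSIP 1")], [("filename", "UIP2")]], [[("case_name", "NSIP1")], [("case_name", "COP 3")]])

def Spec_create_case_mapping (annotations : List (List (String × String))) (predictions : List (List (String × String))) (out : List (String × (List (String × String)) × (List (String × String)))) : Prop := out = create_case_mapping_alt annotations predictions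
instance (annotations : List (List (String × String))) (predictions : List (List (String × String))) (out : List (String × (List (String × String)) × (List (String × String)))) : Decidable (Spec_create_case_mapping annotations predictions out) := by unfold Spec_create_case_mapping; infer_instance

-- ===== CLAIM (what is proved, stated in full; the proofs are below) =====
def Claim_equal_create_case_mapping : Prop := ∀ (annotations : List (List (String × String))) (predictions : List (List (String × String))), Dom_create_case_mapping annotations predictions → Pre_create_case_mapping annotations predictions → Spec_create_case_mapping annotations predictions (create_case_mapping annotations predictions)

-- ===== LEMMAS AND PROOFS =====

-- lookup in a dict built by a keyed insert loop: the LAST element with the wanted key wins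
theorem pv_get?_foldl_insert_key {ν β : Type} (l : List β) (k : β → String) (v : β → ν)
    (d : PySem.Dict String ν) (n : String) :
    (l.foldl (fun d a => d.insert (k a) (v a)) d).get? n =
      (match l.reverse.find? (fun a => k a == n) with
       | some a => some (v a)
       | none => d.get? n) := by
  induction l generalizing d with
  | nil => simp
  | cons a t ih =>
    simp only [List.foldl_cons, List.reverse_cons, List.find?_append, ih]
    cases ht : t.reverse.find? (fun a => k a == n) with
    | some b => simp
    | none =>
      simp only [Option.none_or, List.find?_cons, List.find?_nil]
      rw [PySem.Dict.get?_insert]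
      by_cases h : k a = n
      · simp [h]
      · have : (k a == n) = false := by simp [h]
        simp [this, Ne.symm h]

-- B's inner scan over the predictions collapses to one insert of the LAST matching prediction
theorem pv_inner_scan (predictions : List (List (String × String))) (n : String)
    (a : List (String × String)) (d : PySem.Dict String ((List (String × String)) × (List (String × String)))) :
    (predictions.foldl (fun d p => if pvPredKey p == n then d.insert n (a, p) else d) d) =
      (match predictions.reverse.find? (fun p => pvPredKey p == n) with
       | some p => d.insert n (a, p)
       | none => d) := by
  induction predictions generalizing d with
  | nil => simp
  | cons p t ih =>
    simp only [List.foldl_cons, List.reverse_cons, List.find?_append, ih]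
    cases ht : t.reverse.find? (fun p => pvPredKey p == n) with
    | some b =>
      simp only [Option.some_or]
      by_cases h : pvPredKey p == n
      · rw [if_pos h, PySem.Dict.insert_insert_self]
      · rw [if_neg h]
    | none =>
      simp only [Option.none_or, List.find?_cons, List.find?_nil]
      by_cases h : pvPredKey p == n
      · rw [if_pos h]; simp [h]
      · rw [if_neg h]; simp [h]

-- Set.ofList commutes with filter (generalized over the foldl accumulator)
theorem pv_foldl_add_filter {α : Type} [BEq α] [LawfulBEq α] (p : α → Bool) (xs s : List α) :
    (xs.filter p).foldl PySem.Set.add (s.filter p) = (xs.foldl PySem.Set.add s).filter p := by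
  induction xs generalizing s with
  | nil => simp
  | cons x t ih =>
    have hadd : ∀ s : List α, p x = true →
        PySem.Set.add (s.filter p) x = (PySem.Set.add s x).filter p := by
      intro s hp
      have hc : (s.filter p).contains x = s.contains x := by
        by_cases hm : x ∈ s
        · rw [(List.contains_iff_mem).2 (List.mem_filter.2 ⟨hm, hp⟩), (List.contains_iff_mem).2 hm]
        · have h1 : (s.filter p).contains x = false := by
            simp [List.mem_filter, hm]
          have h2 : s.contains x = false := by simp [hm]
          rw [h1, h2]
      simp only [PySem.Set.add, PySem.Set.contains_eq_listContains, hc]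
      by_cases hm : x ∈ s
      · simp [hm]
      · simp [hm, List.filter_append, hp]
    have hdrop : ∀ s : List α, p x = false →
        (PySem.Set.add s x).filter p = s.filter p := by
      intro s hp
      simp only [PySem.Set.add, PySem.Set.contains_eq_listContains]
      by_cases hm : x ∈ s
      · simp [hm]
      · simp [hm, List.filter_append, hp]
    by_cases hp : p x = true
    · rw [List.filter_cons_of_pos hp, List.foldl_cons, List.foldl_cons,
        show PySem.Set.add (s.filter p) x = (PySem.Set.add s x).filter p from hadd s hp]
      exact ih (PySem.Set.add s x)
    · simp only [Bool.not_eq_true] at hp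
      rw [List.filter_cons_of_neg (by simp [hp]), List.foldl_cons,
        show s.filter p = (PySem.Set.add s x).filter p from (hdrop s hp).symm]
      exact ih (PySem.Set.add s x)

theorem pv_ofList_filter {α : Type} [BEq α] [LawfulBEq α] (p : α → Bool) (xs : List α) :
    PySem.Set.ofList (xs.filter p) = (PySem.Set.ofList xs).filter p := by
  have h := pv_foldl_add_filter p xs []
  simpa [PySem.Set.ofList, PySem.Set.empty] using h

-- find? passes through a filter that every find?-hit satisfies
theorem pv_find?_filter_of_imp {α : Type} (l : List α) (p q : α → Bool)
    (h : ∀ a, q a = true → p a = true) :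
    (l.filter p).find? q = l.find? q := by
  induction l with
  | nil => rfl
  | cons a t ih =>
    by_cases hq : q a = true
    · rw [List.filter_cons_of_pos (h a hq)]
      simp [hq]
    · simp only [Bool.not_eq_true] at hq
      by_cases hp : p a = true
      · rw [List.filter_cons_of_pos hp]; simp [hq, ih]
      · simp only [Bool.not_eq_true] at hp
        rw [List.filter_cons_of_neg (by simp [hp])]
        simp [hq, ih]

-- keys of a keyed insert loop from the empty dict
theorem pv_keys_foldl_insert_key {ν β : Type} (l : List β) (k : β → String) (v : β → ν) :
    (l.foldl (fun d a => d.insert (k a) (v a)) PySem.Dict.empty).keys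
      = PySem.Set.ofList (l.map k) := by
  have h := PySem.Dict.keys_foldl_insert_key l k (fun _ a => v a) PySem.Dict.empty
  simpa [PySem.Dict.keys_empty, PySem.Set.update_nil_left] using h

theorem create_case_mapping_eq (annotations : List (List (String × String))) (predictions : List (List (String × String))) :
    create_case_mapping annotations predictions = create_case_mapping_alt annotations predictions := by
  classical
  set P := pvPredDict predictions with hP
  set AM := pvAnnDict annotations with hAM
  -- predicate "name has a prediction"
  set pN : String → Bool := fun n => (P.get? n).isSome with hpN
  -- P.get? is the last matching prediction
  have hPget : ∀ n, P.get? n = (match predictions.reverse.find? (fun p => pvPredKey p == n) with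
      | some p => some p
      | none => none) := by
    intro n
    rw [hP]
    have h := pv_get?_foldl_insert_key predictions pvPredKey (fun p => p) PySem.Dict.empty n
    rw [show pvPredDict predictions = predictions.foldl (fun d p => d.insert (pvPredKey p) p) PySem.Dict.empty from rfl, h]
    cases predictions.reverse.find? (fun p => pvPredKey p == n) <;> simp
  -- characterize keys of the two input dicts
  have hAMkeys : AM.keys = PySem.Set.ofList (annotations.map pvAnnKey) := by
    rw [hAM]; exact pv_keys_foldl_insert_key annotations pvAnnKey (fun a => a)
  have hPkeys : P.keys = PySem.Set.ofList (predictions.map pvPredKey) := by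
    rw [hP]; exact pv_keys_foldl_insert_key predictions pvPredKey (fun p => p)
  have hAMnodup : AM.keys.Nodup := by rw [hAMkeys]; exact PySem.Set.nodup_ofList _
  have hPnodup : P.keys.Nodup := by rw [hPkeys]; exact PySem.Set.nodup_ofList _
  -- common
  have hcommon : PySem.Set.inter (PySem.Set.ofList AM.keys) (PySem.Set.ofList P.keys)
      = (PySem.Set.ofList (annotations.map pvAnnKey)).filter pN := by
    rw [PySem.Set.ofList_eq_self_of_nodup _ hAMnodup, PySem.Set.ofList_eq_self_of_nodup _ hPnodup,
      hAMkeys]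
    show List.filter (fun x => PySem.Set.contains P.keys x) _ = _
    congr 1
    funext n
    show P.keys.contains n = (P.get? n).isSome
    rw [← PySem.Dict.contains_eq_isSome_get?]
    by_cases hm : n ∈ P.keys
    · rw [List.contains_iff_mem.2 hm, (PySem.Dict.contains_iff_mem_keys P n).2 hm]
    · have h1 : (P.keys).contains n = false := by simp [hm]
      have h2 : P.contains n = false := by
        cases hb : P.contains n
        · rfl
        · exact absurd ((PySem.Dict.contains_iff_mem_keys P n).1 hb) hm
      rw [h1, h2]
  set common := (PySem.Set.ofList (annotations.map pvAnnKey)).filter pN with hcdef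
  have hcommonNodup : common.Nodup := (PySem.Set.nodup_ofList _).filter pN
  -- A's result items
  have hA : create_case_mapping annotations predictions
      = common.map (fun n => (n, ((AM.get? n).getD [], (P.get? n).getD []))) := by
    show ((PySem.Set.inter (PySem.Set.ofList AM.keys) (PySem.Set.ofList P.keys)).foldl
        (fun d n => d.insert n ((AM.get? n).getD [], (P.get? n).getD [])) PySem.Dict.empty).items = _
    rw [hcommon]
    have h := PySem.Dict.items_foldl_insert_fresh common (fun n => n)
      (fun n => ((AM.get? n).getD [], (P.get? n).getD [])) PySem.Dict.empty
      (fun a _ => PySem.Dict.contains_empty a) (by simpa using hcommonNodup)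
    simpa using h
  -- B's nested loop: the inner scan collapses (pv_inner_scan), leaving a keyed insert loop over
  -- the annotations whose key has a prediction
  set Lf := annotations.filter (fun a => pN (pvAnnKey a)) with hLf
  have hBfold : (annotations.foldl (fun d a =>
      predictions.foldl (fun d p =>
        if pvPredKey p == pvAnnKey a then d.insert (pvAnnKey a) (a, p) else d) d)
      PySem.Dict.empty)
      = Lf.foldl (fun d a => d.insert (pvAnnKey a) (a, (P.get? (pvAnnKey a)).getD [])) PySem.Dict.empty := by
    have hstep : (fun (d : PySem.Dict String ((List (String × String)) × (List (String × String)))) a =>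
        predictions.foldl (fun d p =>
          if pvPredKey p == pvAnnKey a then d.insert (pvAnnKey a) (a, p) else d) d)
      = (fun d a => if pN (pvAnnKey a) then d.insert (pvAnnKey a) (a, (P.get? (pvAnnKey a)).getD []) else d) := by
      funext d a
      rw [pv_inner_scan predictions (pvAnnKey a) a d]
      rw [show pN (pvAnnKey a) = (P.get? (pvAnnKey a)).isSome from rfl, hPget (pvAnnKey a)]
      cases h : predictions.reverse.find? (fun p => pvPredKey p == pvAnnKey a) <;> simp
    rw [hstep, hLf, List.foldl_filter]
  set RB := Lf.foldl (fun d a => d.insert (pvAnnKey a) (a, (P.get? (pvAnnKey a)).getD [])) PySem.Dict.empty with hRB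
  have hRBkeys : RB.keys = common := by
    rw [hRB, pv_keys_foldl_insert_key Lf pvAnnKey (fun a => (a, (P.get? (pvAnnKey a)).getD [])), hLf,
      hcdef]
    rw [show annotations.filter (fun a => pN (pvAnnKey a)) = annotations.filter (pN ∘ pvAnnKey) from rfl]
    rw [← List.filter_map, pv_ofList_filter]
  have hRBnodup : RB.keys.Nodup := by rw [hRBkeys]; exact hcommonNodup
  have hB : create_case_mapping_alt annotations predictions
      = common.map (fun n => (n, RB.getD n ([], []))) := by
    show (annotations.foldl (fun d a =>
      predictions.foldl (fun d p =>
        if pvPredKey p == pvAnnKey a then d.insert (pvAnnKey a) (a, p) else d) d)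
      PySem.Dict.empty).items = _
    rw [hBfold, PySem.Dict.items_eq_map_keys RB hRBnodup ([], []), hRBkeys]
  rw [hA, hB]
  apply List.map_congr_left
  intro n hn
  have hn' := hn
  rw [hcdef, List.mem_filter] at hn'
  obtain ⟨hnK, hnP⟩ := hn'
  rw [PySem.Set.mem_ofList] at hnK
  -- the last annotation whose key is n
  have hfindSome : (annotations.reverse.find? (fun a => pvAnnKey a == n)).isSome := by
    rw [List.find?_isSome]
    obtain ⟨a, ha, hk⟩ := List.mem_map.1 hnK
    exact ⟨a, List.mem_reverse.2 ha, by simp [hk]⟩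
  obtain ⟨a₀, ha₀⟩ := Option.isSome_iff_exists.1 hfindSome
  have hk₀ : pvAnnKey a₀ = n := by
    have := List.find?_some ha₀; simpa using this
  -- A's value at n
  have hAMget : AM.get? n = some a₀ := by
    rw [hAM]
    have h := pv_get?_foldl_insert_key annotations pvAnnKey (fun a => a) PySem.Dict.empty n
    rw [show pvAnnDict annotations = annotations.foldl (fun d a => d.insert (pvAnnKey a) a) PySem.Dict.empty from rfl]
    rw [h, ha₀]
  -- B's value at n
  have hRBget : RB.get? n = some (a₀, (P.get? n).getD []) := by
    rw [hRB]
    have h := pv_get?_foldl_insert_key Lf pvAnnKey (fun a => (a, (P.get? (pvAnnKey a)).getD [])) PySem.Dict.empty n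
    rw [h]
    have hrev : Lf.reverse = annotations.reverse.filter (fun a => pN (pvAnnKey a)) := by
      rw [hLf, List.filter_reverse]
    rw [hrev, pv_find?_filter_of_imp _ _ _ (by
      intro a hq
      have : pvAnnKey a = n := by simpa using hq
      rw [this]; exact hnP), ha₀]
    show some (a₀, (P.get? (pvAnnKey a₀)).getD []) = some (a₀, (P.get? n).getD [])
    rw [hk₀]
  rw [PySem.Dict.getD_eq_get?_getD, hRBget, hAMget]
  rfl

-- ===== VERDICT (by name: the statement is the Claim_ definition above) =====
theorem create_case_mapping_spec : Claim_equal_create_case_mapping := by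
  intro annotations predictions _ _
  unfold Spec_create_case_mapping
  exact create_case_mapping_eq annotations predictions
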